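-- pv_equiv track=rewrite | github.com/Spphire/umi_base | scripts/analyze_gripper_trend.py | find_trend_windows
-- ===== SOURCE A (Python) =====
-- def find_trend_windows(trend):
--     """
--     将趋势标签分段，返回[start, end, label]列表
--     """
--     # 合并短窗口，减少噪声影响
--     min_len = 5  # 最小窗口长度
--     windows = []
--     if len(trend) == 0:
--         return windows
--     start = 0
--     current = trend[0]
--     for i in range(1, len(trend)):
--         if trend[i] != current:
--             if i - start < min_len and windows:
--                 # 合并到前一个窗口
--                 prev = windows.pop()
--                 start = prev[0]
--                 current = prev[2]
--             windows.append((start, i, current))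
--             start = i
--             current = trend[i]
--     if len(trend) - start < min_len and windows:
--         # 合并最后一个短窗口
--         prev = windows.pop()
--         start = prev[0]
--         current = prev[2]
--     windows.append((start, len(trend), current))
--     return windows
-- ===== SOURCE B (Python) =====
-- def find_trend_windows(trend):
--     """
--     将趋势标签分段，返回[start, end, label]列表
--     """
--     if not trend:
--         return []
--     # pass 1: maximal runs (start, end, label)
--     runs = []
--     start = 0
--     for i in range(1, len(trend)):
--         if trend[i] != trend[i - 1]:
--             runs.append((start, i, trend[i - 1]))
--             start = i
--     runs.append((start, len(trend), trend[-1]))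
--     # pass 2: fold runs, absorbing short runs into the previous window
--     out = []
--     for s, e, lab in runs:
--         if e - s < 5 and out:
--             ps, _, pl = out[-1]
--             out[-1] = (ps, e, pl)
--         else:
--             out.append((s, e, lab))
--     return out
-- ===== Notes on version B (the rewrite author's own statement) =====
-- stated objective: alternative
-- what changed: A merges short segments inline inside a single index loop by popping and re-pushing the last window; B first builds the list of maximal runs in one scan, then folds this run list into windows, absorbing each short run into the previous window by replacing its tail entry.
import Mathlib
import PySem

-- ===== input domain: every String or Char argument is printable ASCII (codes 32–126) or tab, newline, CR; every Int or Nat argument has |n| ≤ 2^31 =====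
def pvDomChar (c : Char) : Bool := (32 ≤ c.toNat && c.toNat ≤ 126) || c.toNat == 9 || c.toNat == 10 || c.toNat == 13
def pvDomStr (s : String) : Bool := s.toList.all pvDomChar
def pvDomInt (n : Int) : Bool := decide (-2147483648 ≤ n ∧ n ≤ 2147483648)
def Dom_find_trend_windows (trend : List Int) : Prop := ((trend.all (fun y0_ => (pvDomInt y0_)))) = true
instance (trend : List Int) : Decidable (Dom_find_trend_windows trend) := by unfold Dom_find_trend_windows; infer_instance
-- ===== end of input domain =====

-- B re-decomposes A's single inline-merging loop into two passes: build maximal runs, then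
-- fold them into windows, absorbing short runs into the previous window ("alternative" objective).

-- ===== PORT A =====
-- loop body of A's for-loop; state = (windows, start, current); trend[i] via pyGetD (index always in range)
def pvStepA (trend : List Int) (st : List (Int × Int × Int) × Int × Int) (i : Int) :
    List (Int × Int × Int) × Int × Int :=
  if PySem.List.pyGetD trend i 0 ≠ st.2.2 then
    let p :=
      if i - st.2.1 < 5 ∧ st.1 ≠ [] then
        match st.1.getLast? with
        | some prev => (st.1.dropLast, prev.1, prev.2.2)   -- windows.pop(); start = prev[0]; current = prev[2]
        | none => st
      else st
    (p.1 ++ [(p.2.1, i, p.2.2)], i, PySem.List.pyGetD trend i 0)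
  else st

def find_trend_windows (trend : List Int) : List (Int × Int × Int) :=
  if trend.length = 0 then []
  else
    let st := (PySem.List.pyRange 1 (trend.length : Int) 1).foldl (pvStepA trend)
      ([], 0, PySem.List.pyGetD trend 0 0)
    let p :=
      if (trend.length : Int) - st.2.1 < 5 ∧ st.1 ≠ [] then
        match st.1.getLast? with
        | some prev => (st.1.dropLast, prev.1, prev.2.2)
        | none => st
      else st
    p.1 ++ [(p.2.1, (trend.length : Int), p.2.2)]

-- ===== PORT B =====
-- pass-1 loop body: state = (runs, start)
def pvStepR (trend : List Int) (st : List (Int × Int × Int) × Int) (i : Int) :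
    List (Int × Int × Int) × Int :=
  if PySem.List.pyGetD trend i 0 ≠ PySem.List.pyGetD trend (i - 1) 0 then
    (st.1 ++ [(st.2, i, PySem.List.pyGetD trend (i - 1) 0)], i)
  else st

-- pass-2 fold body: absorb a short run into the previous window, else append it
def pvMergeStep (out : List (Int × Int × Int)) (seg : Int × Int × Int) : List (Int × Int × Int) :=
  if seg.2.1 - seg.1 < 5 then
    match out.getLast? with
    | some prev => out.dropLast ++ [(prev.1, seg.2.1, prev.2.2)]   -- out[-1] = (ps, e, pl)
    | none => out ++ [seg]
  else out ++ [seg]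

def find_trend_windows_alt (trend : List Int) : List (Int × Int × Int) :=
  if trend = [] then []
  else
    let rs := (PySem.List.pyRange 1 (trend.length : Int) 1).foldl (pvStepR trend) ([], 0)
    let runs := rs.1 ++ [(rs.2, (trend.length : Int), PySem.List.pyGetD trend (-1) 0)]
    runs.foldl pvMergeStep []

-- ===== PRECONDITION & SPEC =====
def Spec_find_trend_windows (trend : List Int) (out : List (Int × Int × Int)) : Prop := out = find_trend_windows_alt trend
instance (trend : List Int) (out : List (Int × Int × Int)) : Decidable (Spec_find_trend_windows trend out) := by unfold Spec_find_trend_windows; infer_instance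

-- ===== CLAIM (what is proved, stated in full; the proofs are below) =====
def Claim_equal_find_trend_windows : Prop := ∀ (trend : List Int), Dom_find_trend_windows trend → Spec_find_trend_windows trend (find_trend_windows trend)

-- ===== LEMMAS AND PROOFS =====

-- A's inline pop/re-push merge step equals B's pvMergeStep applied to the finished segment
lemma mergeShape (w : List (Int × Int × Int)) (s e c : Int) :
    (let p :=
      if e - s < 5 ∧ w ≠ [] then
        match w.getLast? with
        | some prev => (w.dropLast, prev.1, prev.2.2)
        | none => ((w, s, c) : List (Int × Int × Int) × Int × Int)
      else (w, s, c)
     p.1 ++ [(p.2.1, e, p.2.2)]) = pvMergeStep w (s, e, c) := by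
  unfold pvMergeStep
  rcases w.eq_nil_or_concat with h | ⟨ys, y, h⟩ <;> subst h <;> simp <;> split_ifs <;> simp_all

-- loop invariant: after processing indices [1, n), A's state is (merge-fold of B's runs, same start,
-- label of the current run = trend[n-1])
lemma loopInv (trend : List Int) (n : ℕ) (h1 : 1 ≤ n) (h2 : n ≤ trend.length) :
    (PySem.List.pyRange 1 (n : Int) 1).foldl (pvStepA trend) ([], 0, PySem.List.pyGetD trend 0 0)
      = (((PySem.List.pyRange 1 (n : Int) 1).foldl (pvStepR trend) ([], 0)).1.foldl pvMergeStep [],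
         ((PySem.List.pyRange 1 (n : Int) 1).foldl (pvStepR trend) ([], 0)).2,
         PySem.List.pyGetD trend ((n : Int) - 1) 0) := by
  induction n with
  | zero => omega
  | succ n ih =>
    rcases Nat.lt_or_ge n 1 with hn | hn
    · interval_cases n
      simp [PySem.List.pyRange_one_eq_nil]
    · have hsplit : PySem.List.pyRange 1 ((n : Int) + 1) 1
          = PySem.List.pyRange 1 (n : Int) 1 ++ [(n : Int)] :=
        PySem.List.pyRange_one_succ_right (by exact_mod_cast hn)
      have ih' := ih hn (by omega)
      push_cast
      rw [hsplit, List.foldl_append, List.foldl_append, ih']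
      simp only [List.foldl_cons, List.foldl_nil]
      by_cases hne : PySem.List.pyGetD trend (n : Int) 0 = PySem.List.pyGetD trend ((n : Int) - 1) 0
      · simp [pvStepA, pvStepR, hne]
      · simp only [pvStepA, pvStepR, hne, ne_eq, not_false_eq_true, if_pos]

        refine Prod.ext ?_ (Prod.ext rfl (by push_cast; ring_nf))
        simpa using mergeShape
          (((PySem.List.pyRange 1 (n : Int) 1).foldl (pvStepR trend) ([], 0)).1.foldl pvMergeStep [])
          ((PySem.List.pyRange 1 (n : Int) 1).foldl (pvStepR trend) ([], 0)).2 (n : Int)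
          (PySem.List.pyGetD trend ((n : Int) - 1) 0)

-- ===== VERDICT (by name: the statement is the Claim_ definition above) =====
theorem find_trend_windows_spec : Claim_equal_find_trend_windows := by
  intro trend _
  unfold Spec_find_trend_windows find_trend_windows find_trend_windows_alt
  rcases trend.eq_nil_or_concat with h | ⟨ys, y, h⟩
  · simp [h]
  have hne : trend ≠ [] := by subst h; simp
  have hlen : 1 ≤ trend.length := by subst h; simp
  simp only [if_neg (by omega : ¬ trend.length = 0), if_neg hne]
  have hinv := loopInv trend trend.length hlen le_rfl
  rw [hinv, List.foldl_append, List.foldl_cons, List.foldl_nil]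
  have hlast : PySem.List.pyGetD trend (-1) 0 = PySem.List.pyGetD trend ((trend.length : Int) - 1) 0 := by
    rw [PySem.List.pyGetD_neg_one _ _ hne,
      show ((trend.length : Int) - 1) = ((trend.length - 1 : ℕ) : Int) by omega,
      PySem.List.pyGetD_natCast, List.getLast_eq_getElem,
      List.getD_eq_getElem _ _ (by omega)]
  rw [hlast]
  simpa using mergeShape
    (((PySem.List.pyRange 1 (trend.length : Int) 1).foldl (pvStepR trend) ([], 0)).1.foldl pvMergeStep [])
    ((PySem.List.pyRange 1 (trend.length : Int) 1).foldl (pvStepR trend) ([], 0)).2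
    (trend.length : Int) (PySem.List.pyGetD trend ((trend.length : Int) - 1) 0)
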